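-- pv_equiv track=rewrite | github.com/visheshcse/LeetcodeQuestions | Problems/Day09-Recursion/04.Combination-sum-II.py | combinationSum2_pick_skip
-- ===== SOURCE A (Python) =====
-- from typing import List
--
-- def combinationSum2_pick_skip(candidates: List[int], target: int) -> List[List[int]]:
--     """
--     Pick/skip recursive approach:
--     1. Sort, recurse: at each idx, pick element (move to next) or skip duplicates.
--     2. Skip duplicate candidates at any index after picking.
--     3. If target == 0, add combination. If target < 0 or end, backtrack.
--     """
--     def helper(idx, path, rem):
--         if rem == 0:
--             result.append(path[:])
--             return
--         if rem < 0 or idx == len(candidates):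
--             return
--         # Pick idx
--         path.append(candidates[idx])
--         helper(idx + 1, path, rem - candidates[idx])
--         path.pop()
--         # Skip further duplicate candidates
--         nxt = idx + 1
--         while nxt < len(candidates) and candidates[nxt] == candidates[idx]:
--             nxt += 1
--         helper(nxt, path, rem)
--
--     candidates.sort()
--     result = []
--     helper(0, [], target)
--     return result
-- ===== SOURCE B (Python) =====
-- def combinationSum2_pick_skip(candidates, target):
--     """For-loop backtracking: sort, then at each level iterate over remaining
--     candidates, skipping consecutive duplicates past the first choice."""
--     candidates.sort()
--     n = len(candidates)
--     result = []
--
--     def helper(start, path, rem):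
--         if rem == 0:
--             result.append(path[:])
--             return
--         if rem < 0:
--             return
--         for i in range(start, n):
--             if i > start and candidates[i] == candidates[i - 1]:
--                 continue
--             path.append(candidates[i])
--             helper(i + 1, path, rem - candidates[i])
--             path.pop()
--
--     helper(0, [], target)
--     return result
-- ===== Notes on version B (the rewrite author's own statement) =====
-- stated objective: alternative
-- what changed: Replaces the binary pick/skip recursion (pick idx, or while-scan past duplicates and skip) with the canonical for-loop backtracking: each level iterates i over the remaining sorted candidates, skipping i when i > start and candidates[i] == candidates[i-1], recursing on i+1; same combinations in the same order.
import Mathlib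
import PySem

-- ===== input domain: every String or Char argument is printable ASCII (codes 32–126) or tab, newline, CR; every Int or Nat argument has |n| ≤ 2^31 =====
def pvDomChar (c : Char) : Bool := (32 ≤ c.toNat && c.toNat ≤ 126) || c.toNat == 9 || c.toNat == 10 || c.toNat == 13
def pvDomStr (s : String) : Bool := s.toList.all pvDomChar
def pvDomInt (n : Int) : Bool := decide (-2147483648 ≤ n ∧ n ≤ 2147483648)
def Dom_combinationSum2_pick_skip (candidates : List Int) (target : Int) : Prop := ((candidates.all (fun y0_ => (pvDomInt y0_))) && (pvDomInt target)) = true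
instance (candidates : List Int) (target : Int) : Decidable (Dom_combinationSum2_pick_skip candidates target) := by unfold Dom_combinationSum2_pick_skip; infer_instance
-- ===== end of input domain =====

-- B replaces A's binary pick/skip recursion by canonical for-loop backtracking with
-- consecutive-duplicate skipping (same results, same order); equivalence is about the
-- RETURN value only (both Pythons sort `candidates` in place, the same side effect).

-- ===== PORT A =====

-- the `while nxt < len(candidates) and candidates[nxt] == candidates[idx]` loop
def pvSkipDupA (cs : List Int) (v : Int) (nxt : Nat) : Nat :=
  if h : nxt < cs.length ∧ cs.getD nxt 0 = v then pvSkipDupA cs v (nxt + 1) else nxt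
termination_by cs.length - nxt
decreasing_by omega

theorem pvSkipDupA_ge (cs : List Int) (v : Int) (nxt : Nat) : nxt ≤ pvSkipDupA cs v nxt := by
  fun_induction pvSkipDupA cs v nxt with
  | case1 nxt h ih => omega
  | case2 nxt h => omega

-- helper(idx, path, rem), returning the combinations it appends to `result`, in order.
-- Python tests `idx == len(candidates)`; helper is only ever called with idx ≤ len,
-- where this equals the `cs.length ≤ idx` written here (needed for termination).
def pvHelperA (cs : List Int) (idx : Nat) (path : List Int) (rem : Int) : List (List Int) :=
  if rem = 0 then [path]
  else if rem < 0 ∨ cs.length ≤ idx then []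
  else
    pvHelperA cs (idx + 1) (path ++ [cs.getD idx 0]) (rem - cs.getD idx 0)
      ++ pvHelperA cs (pvSkipDupA cs (cs.getD idx 0) (idx + 1)) path rem
termination_by cs.length - idx
decreasing_by
  · omega
  · have := pvSkipDupA_ge cs (cs.getD idx 0) (idx + 1); omega

def combinationSum2_pick_skip (candidates : List Int) (target : Int) : List (List Int) :=
  pvHelperA (PySem.List.sorted candidates (fun x => x) false) 0 [] target

-- ===== PORT B =====

mutual
-- helper(start, path, rem) of Source B
def pvHelperB (cs : List Int) (start : Nat) (path : List Int) (rem : Int) : List (List Int) :=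
  if rem = 0 then [path]
  else if rem < 0 then []
  else pvLoopB cs start start path rem
termination_by 2 * (cs.length + 1 - start) + 1

-- the `for i in range(start, n)` loop of helper, from index i on
def pvLoopB (cs : List Int) (start i : Nat) (path : List Int) (rem : Int) : List (List Int) :=
  if _h : i < cs.length then
    (if start < i ∧ cs.getD i 0 = cs.getD (i - 1) 0 then []
     else pvHelperB cs (i + 1) (path ++ [cs.getD i 0]) (rem - cs.getD i 0))
      ++ pvLoopB cs start (i + 1) path rem
  else []
termination_by 2 * (cs.length + 1 - i)
end

def combinationSum2_pick_skip_alt (candidates : List Int) (target : Int) : List (List Int) :=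
  pvHelperB (PySem.List.sorted candidates (fun x => x) false) 0 [] target

-- ===== PRECONDITION & SPEC =====
def Spec_combinationSum2_pick_skip (candidates : List Int) (target : Int) (out : List (List Int)) : Prop := out = combinationSum2_pick_skip_alt candidates target
instance (candidates : List Int) (target : Int) (out : List (List Int)) : Decidable (Spec_combinationSum2_pick_skip candidates target out) := by unfold Spec_combinationSum2_pick_skip; infer_instance

-- ===== CLAIM (what is proved, stated in full; the proofs are below) =====
def Claim_equal_combinationSum2_pick_skip : Prop := ∀ (candidates : List Int) (target : Int), Dom_combinationSum2_pick_skip candidates target → Spec_combinationSum2_pick_skip candidates target (combinationSum2_pick_skip candidates target)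

-- ===== LEMMAS AND PROOFS =====

theorem pvSkipDupA_le (cs : List Int) (v : Int) (nxt : Nat) (h : nxt ≤ cs.length) :
    pvSkipDupA cs v nxt ≤ cs.length := by
  fun_induction pvSkipDupA cs v nxt with
  | case1 nxt h' ih => exact ih (by omega)
  | case2 nxt h' => exact h

theorem pvSkipDupA_run (cs : List Int) (v : Int) (nxt : Nat) :
    ∀ k, nxt ≤ k → k < pvSkipDupA cs v nxt → cs.getD k 0 = v := by
  fun_induction pvSkipDupA cs v nxt with
  | case1 nxt h ih =>
    intro k hk1 hk2
    rcases Nat.eq_or_lt_of_le hk1 with rfl | hlt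
    · exact h.2
    · exact ih k hlt hk2
  | case2 nxt h => intro k hk1 hk2; omega

theorem pvSkipDupA_stop (cs : List Int) (v : Int) (nxt : Nat)
    (h : pvSkipDupA cs v nxt < cs.length) : cs.getD (pvSkipDupA cs v nxt) 0 ≠ v := by
  fun_induction pvSkipDupA cs v nxt with
  | case1 nxt h' ih => exact ih h
  | case2 nxt h' =>
    intro hv
    exact h' ⟨h, hv⟩

-- the loop's body at each index ≥ i does not depend on the start index,
-- as long as the skip condition agrees
theorem pvLoopB_congr_start (cs : List Int) (s1 s2 i : Nat) (path : List Int) (rem : Int)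
    (hc : ∀ k, i ≤ k → k < cs.length →
      ((s1 < k ∧ cs.getD k 0 = cs.getD (k - 1) 0) ↔ (s2 < k ∧ cs.getD k 0 = cs.getD (k - 1) 0))) :
    pvLoopB cs s1 i path rem = pvLoopB cs s2 i path rem := by
  by_cases h : i < cs.length
  · conv_lhs => rw [pvLoopB]
    conv_rhs => rw [pvLoopB]
    simp only [dif_pos h]
    have hiff := hc i (le_refl i) h
    have hrec := pvLoopB_congr_start cs s1 s2 (i + 1) path rem
      (fun k hk1 hk2 => hc k (by omega) hk2)
    by_cases hskip : s1 < i ∧ cs.getD i 0 = cs.getD (i - 1) 0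
    · rw [if_pos hskip, if_pos (hiff.mp hskip), hrec]
    · rw [if_neg hskip, if_neg (fun h2 => hskip (hiff.mpr h2)), hrec]
  · conv_lhs => rw [pvLoopB]
    conv_rhs => rw [pvLoopB]
    simp only [dif_neg h]
termination_by cs.length - i
decreasing_by omega

-- inside the duplicate run of cs.getD idx 0, the loop skips every index
theorem pvLoopB_skip_run (cs : List Int) (idx : Nat) (path : List Int) (rem : Int)
    (hidx : idx < cs.length) (j : Nat) (hj1 : idx < j)
    (hj2 : j ≤ pvSkipDupA cs (cs.getD idx 0) (idx + 1)) :
    pvLoopB cs idx j path rem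
      = pvLoopB cs idx (pvSkipDupA cs (cs.getD idx 0) (idx + 1)) path rem := by
  set r := pvSkipDupA cs (cs.getD idx 0) (idx + 1) with hr
  rcases Nat.eq_or_lt_of_le hj2 with rfl | hjr
  · rfl
  · have hrn : r ≤ cs.length := pvSkipDupA_le cs _ (idx + 1) (by omega)
    have hjn : j < cs.length := by omega
    have hcj : cs.getD j 0 = cs.getD idx 0 := pvSkipDupA_run cs _ (idx + 1) j (by omega) hjr
    have hcj1 : cs.getD (j - 1) 0 = cs.getD idx 0 := by
      rcases Nat.eq_or_lt_of_le (Nat.succ_le_of_lt hj1) with h1 | h1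
      · rw [show j - 1 = idx by omega]
      · exact pvSkipDupA_run cs _ (idx + 1) (j - 1) (by omega) (by omega)
    conv_lhs => rw [pvLoopB]
    simp only [dif_pos hjn]
    rw [if_pos ⟨hj1, by rw [hcj, hcj1]⟩]
    simp only [List.nil_append]
    exact pvLoopB_skip_run cs idx path rem hidx (j + 1) (by omega) hjr
termination_by pvSkipDupA cs (cs.getD idx 0) (idx + 1) - j
decreasing_by omega

-- main equivalence of the two recursions
theorem pvHelper_eq (cs : List Int) (m : Nat) :
    ∀ idx path rem, cs.length - idx < m →
      pvHelperA cs idx path rem = pvHelperB cs idx path rem := by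
  induction m with
  | zero => intro idx path rem h; omega
  | succ m ih =>
    intro idx path rem hm
    rw [pvHelperA, pvHelperB]
    by_cases h0 : rem = 0
    · rw [if_pos h0, if_pos h0]
    · rw [if_neg h0, if_neg h0]
      by_cases hneg : rem < 0
      · rw [if_pos (Or.inl hneg), if_pos hneg]
      · rw [if_neg hneg]
        by_cases hend : cs.length ≤ idx
        · rw [if_pos (Or.inr hend), pvLoopB]
          simp only [dif_neg (by omega : ¬ idx < cs.length)]
        · rw [if_neg (by omega : ¬ (rem < 0 ∨ cs.length ≤ idx))]
          have hidx : idx < cs.length := by omega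
          set r := pvSkipDupA cs (cs.getD idx 0) (idx + 1) with hr
          have hrge : idx + 1 ≤ r := pvSkipDupA_ge cs _ (idx + 1)
          have hrle : r ≤ cs.length := pvSkipDupA_le cs _ (idx + 1) (by omega)
          -- unfold B's loop at i = idx (never skipped: start < i fails)
          rw [pvLoopB]
          simp only [dif_pos hidx]
          rw [if_neg (by omega : ¬ (idx < idx ∧ cs.getD idx 0 = cs.getD (idx - 1) 0))]
          -- first summand: the pick branch, by IH
          rw [ih (idx + 1) (path ++ [cs.getD idx 0]) (rem - cs.getD idx 0) (by omega)]
          -- second summand: skip the duplicate run, then restart the loop at r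
          have h2 : pvLoopB cs idx (idx + 1) path rem = pvLoopB cs r r path rem := by
            rw [pvLoopB_skip_run cs idx path rem hidx (idx + 1) (by omega) hrge, ← hr]
            apply pvLoopB_congr_start
            intro k hk1 hk2
            rcases Nat.eq_or_lt_of_le hk1 with heq | hk3
            · have hstop : cs.getD k 0 ≠ cs.getD idx 0 := by
                rw [← heq, hr]
                exact pvSkipDupA_stop cs _ (idx + 1) (by rw [← hr]; omega)
              have hprev : cs.getD (k - 1) 0 = cs.getD idx 0 := by
                rcases Nat.eq_or_lt_of_le hrge with h1 | h1
                · rw [show k - 1 = idx by omega]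
                · exact pvSkipDupA_run cs _ (idx + 1) (k - 1) (by omega) (by rw [← hr]; omega)
              constructor
              · rintro ⟨_, hc⟩; rw [hprev] at hc; exact absurd hc hstop
              · rintro ⟨hc, _⟩; omega
            · constructor <;> (rintro ⟨_, hc⟩; exact ⟨by omega, hc⟩)
          have h3 : pvHelperB cs r path rem = pvLoopB cs r r path rem := by
            rw [pvHelperB, if_neg h0, if_neg hneg]
          rw [ih r path rem (by omega), h2, h3]

-- ===== VERDICT (by name: the statement is the Claim_ definition above) =====
theorem combinationSum2_pick_skip_spec : Claim_equal_combinationSum2_pick_skip := by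
  intro candidates target _
  unfold Spec_combinationSum2_pick_skip combinationSum2_pick_skip combinationSum2_pick_skip_alt
  exact pvHelper_eq (PySem.List.sorted candidates (fun x => x) false)
    ((PySem.List.sorted candidates (fun x => x) false).length + 1) 0 [] target (by omega)
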